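-- pv_equiv track=rewrite | github.com/lupusludensest/algorithms | code_challenge_separate_numbers_from_string.py | spr_nmbrs_str
-- ===== SOURCE A (Python) =====
-- def spr_nmbrs_str(str_a):
--     dgts = []
--     num = ''
--     chrs = ''
--     for i in str_a:
--         if i.isdigit():
--             num += i
--         else:
--             if num:
--                 dgts.append(int(num))
--                 num = ''
--             chrs += i
--     if num:
--         dgts.append(int(num))
--
--     return f'Dgts: {dgts}\nChrs: {chrs}'
-- ===== SOURCE B (Python) =====
-- def spr_nmbrs_str(str_a):
--     dgts = []
--     chrs = ''
--     i, n = 0, len(str_a)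
--     while i < n:
--         k = str_a[i].isdigit()
--         j = i + 1
--         while j < n and str_a[j].isdigit() == k:
--             j += 1
--         run = str_a[i:j]
--         if k:
--             dgts.append(int(run))
--         else:
--             chrs += run
--         i = j
--     return f'Dgts: {dgts}\nChrs: {chrs}'
-- ===== Notes on version B (the rewrite author's own statement) =====
-- stated objective: alternative
-- what changed: B splits the string into maximal same-class (digit/non-digit) runs with an inner scan and converts or appends whole runs, instead of A's one-character-at-a-time state machine that carries a pending digit buffer and flushes it on each class change and at the end.
import Mathlib
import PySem

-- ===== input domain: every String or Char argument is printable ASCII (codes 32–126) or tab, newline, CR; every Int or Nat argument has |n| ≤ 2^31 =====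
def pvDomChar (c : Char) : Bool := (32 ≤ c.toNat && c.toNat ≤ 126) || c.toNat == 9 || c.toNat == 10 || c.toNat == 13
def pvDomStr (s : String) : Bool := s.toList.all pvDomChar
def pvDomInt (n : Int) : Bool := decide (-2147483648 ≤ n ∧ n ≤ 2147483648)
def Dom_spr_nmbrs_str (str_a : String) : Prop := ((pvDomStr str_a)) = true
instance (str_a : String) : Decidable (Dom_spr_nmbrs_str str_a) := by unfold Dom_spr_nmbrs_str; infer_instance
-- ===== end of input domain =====

-- B splits the string into maximal digit/non-digit runs and handles each run whole,
-- instead of A's per-character state machine with a pending number buffer (objective: alternative).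


-- ===== PORT A =====
-- int(num): num is always a nonempty all-digit string at the call sites, so ofChars? is some; getD 0 never fires.
def sprInt (cs : List Char) : Int := (PySem.Int.ofChars? cs).getD 0

-- f'Dgts: {dgts}\nChrs: {chrs}'  (Python list repr of an int list, shared verbatim by A and B)
def sprFmt (dgts : List Int) (chrs : List Char) : String :=
  String.mk ("Dgts: [".toList ++ PySem.Chars.join [',', ' '] (dgts.map PySem.Int.toChars)
    ++ "]".toList ++ "\nChrs: ".toList ++ chrs)

-- the for-loop body of A
def sprStepA (st : List Int × List Char × List Char) (i : Char) : List Int × List Char × List Char :=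
  if PySem.Chars.isdigit i then (st.1, st.2.1 ++ [i], st.2.2)
  else if st.2.1 ≠ [] then (st.1 ++ [sprInt st.2.1], [], st.2.2 ++ [i])
  else (st.1, st.2.1, st.2.2 ++ [i])

def spr_nmbrs_str (str_a : String) : String :=
  let st := str_a.toList.foldl sprStepA ([], [], [])
  let dgts := if st.2.1 ≠ [] then st.1 ++ [sprInt st.2.1] else st.1
  sprFmt dgts st.2.2

-- ===== PORT B =====
-- the outer while loop: peel off the maximal run of the head's digit-class, recurse on the rest
def sprRuns (cs : List Char) : List (Bool × List Char) :=
  match cs with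
  | [] => []
  | c :: rest =>
    let k := PySem.Chars.isdigit c
    (k, c :: rest.takeWhile (fun x => PySem.Chars.isdigit x == k)) ::
      sprRuns (rest.dropWhile (fun x => PySem.Chars.isdigit x == k))
termination_by cs.length
decreasing_by simp; exact List.length_dropWhile_le _ _

def sprStepB (st : List Int × List Char) (run : Bool × List Char) : List Int × List Char :=
  if run.1 then (st.1 ++ [sprInt run.2], st.2) else (st.1, st.2 ++ run.2)

def spr_nmbrs_str_alt (str_a : String) : String :=
  let st := (sprRuns str_a.toList).foldl sprStepB ([], [])
  sprFmt st.1 st.2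

-- ===== PRECONDITION & SPEC =====
def Spec_spr_nmbrs_str (str_a : String) (out : String) : Prop := out = spr_nmbrs_str_alt str_a
instance (str_a : String) (out : String) : Decidable (Spec_spr_nmbrs_str str_a out) := by unfold Spec_spr_nmbrs_str; infer_instance

-- ===== CLAIM (what is proved, stated in full; the proofs are below) =====
def Claim_equal_spr_nmbrs_str : Prop := ∀ (str_a : String), Dom_spr_nmbrs_str str_a → Spec_spr_nmbrs_str str_a (spr_nmbrs_str str_a)

-- ===== LEMMAS AND PROOFS =====

-- A's loop across a run of digits just accumulates them onto num
theorem sprA_digit_run (xs : List Char) (h : ∀ x ∈ xs, PySem.Chars.isdigit x = true) :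
    ∀ (rest : List Char) (d : List Int) (n c : List Char),
    (xs ++ rest).foldl sprStepA (d, n, c) = rest.foldl sprStepA (d, n ++ xs, c) := by
  induction xs with
  | nil => intro rest d n c; simp
  | cons x xs ih =>
    intro rest d n c
    have hx : PySem.Chars.isdigit x = true := h x (by simp)
    simp only [List.cons_append, List.foldl_cons, sprStepA, hx, if_true]
    rw [ih (fun y hy => h y (by simp [hy]))]
    simp

-- A's loop across a run of non-digits with empty num just appends them to chrs
theorem sprA_nondigit_run (xs : List Char) (h : ∀ x ∈ xs, PySem.Chars.isdigit x = false) :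
    ∀ (rest : List Char) (d : List Int) (c : List Char),
    (xs ++ rest).foldl sprStepA (d, [], c) = rest.foldl sprStepA (d, [], c ++ xs) := by
  induction xs with
  | nil => intro rest d c; simp
  | cons x xs ih =>
    intro rest d c
    have hx : PySem.Chars.isdigit x = false := h x (by simp)
    simp only [List.cons_append, List.foldl_cons, sprStepA, hx]
    rw [if_neg (by simp), if_neg (by simp)]
    rw [ih (fun y hy => h y (by simp [hy]))]
    simp

def sprFlush (st : List Int × List Char × List Char) : List Int × List Char :=
  (if st.2.1 ≠ [] then st.1 ++ [sprInt st.2.1] else st.1, st.2.2)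

-- main invariant: A's fold from an empty num, flushed at the end, equals B's fold over the runs
theorem sprMain : ∀ (n : Nat) (cs : List Char), cs.length = n → ∀ (d : List Int) (c : List Char),
    sprFlush (cs.foldl sprStepA (d, [], c)) = (sprRuns cs).foldl sprStepB (d, c) := by
  intro n
  induction n using Nat.strong_induction_on with
  | _ n ih' =>
  intro cs hn d c
  have ih : ∀ (cs' : List Char), cs'.length < cs.length → ∀ d c,
      sprFlush (cs'.foldl sprStepA (d, [], c)) = (sprRuns cs').foldl sprStepB (d, c) := by
    intro cs' h d c; exact ih' cs'.length (hn ▸ h) cs' rfl d c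
  match cs, ih with
  | [], _ => simp [sprRuns, sprFlush]
  | ch :: rest, ih =>
    cases hkk : PySem.Chars.isdigit ch with
    | true =>
      have htwall : ∀ x ∈ rest.takeWhile (fun x => PySem.Chars.isdigit x == true),
          PySem.Chars.isdigit x = true := fun x hx => by simpa using List.mem_takeWhile_imp hx
      have hdwlen : (rest.dropWhile (fun x => PySem.Chars.isdigit x == true)).length ≤ rest.length :=
        List.length_dropWhile_le _ _
      have hdwhead : ∀ x xs, rest.dropWhile (fun x => PySem.Chars.isdigit x == true) = x :: xs →
          PySem.Chars.isdigit x = false := by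
        intro x xs hx
        have := List.head?_dropWhile_not (fun y => PySem.Chars.isdigit y == true) rest
        rw [hx] at this; simpa using this
      have hsplit : ch :: rest = (ch :: rest.takeWhile (fun x => PySem.Chars.isdigit x == true))
          ++ rest.dropWhile (fun x => PySem.Chars.isdigit x == true) := by
        simp [List.takeWhile_append_dropWhile]
      have hruns : sprRuns (ch :: rest)
          = (true, ch :: rest.takeWhile (fun x => PySem.Chars.isdigit x == true))
            :: sprRuns (rest.dropWhile (fun x => PySem.Chars.isdigit x == true)) := by
        rw [sprRuns]; simp only [hkk]
      generalize hg1 : rest.takeWhile (fun x => PySem.Chars.isdigit x == true) = tw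
        at htwall hsplit hruns
      generalize hg2 : rest.dropWhile (fun x => PySem.Chars.isdigit x == true) = dw
        at hdwlen hdwhead hsplit hruns
      have hall : ∀ x ∈ ch :: tw, PySem.Chars.isdigit x = true := by
        intro x hx
        rcases List.mem_cons.1 hx with h | h
        · rw [h]; exact hkk
        · exact htwall x h
      rw [hruns, hsplit, sprA_digit_run (ch :: tw) hall, List.foldl_cons]
      simp [sprStepB]
      match dw, hdwhead, hdwlen with
      | [], _, _ => simp [sprRuns, sprFlush]
      | x :: xs, hdwhead, hdwlen =>
        have hx : PySem.Chars.isdigit x = false := hdwhead x xs rfl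
        have hlen1 : (x :: xs).length < (ch :: rest).length := by
          simpa using Nat.lt_succ_of_le hdwlen
        have hlen2 : xs.length < (ch :: rest).length := by
          simp at hlen1 ⊢; omega
        simp only [List.foldl_cons, sprStepA, hx, Bool.false_eq_true, if_false,
          if_pos (by simp : (ch :: tw ≠ []))]
        rw [← ih (x :: xs) hlen1 (d ++ [sprInt (ch :: tw)]) c]
        simp only [List.foldl_cons, sprStepA, hx, Bool.false_eq_true, if_false,
          if_neg (by simp : ¬(([] : List Char) ≠ []))]
    | false =>
      have htwall : ∀ x ∈ rest.takeWhile (fun x => PySem.Chars.isdigit x == false),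
          PySem.Chars.isdigit x = false := fun x hx => by simpa using List.mem_takeWhile_imp hx
      have hdwlen : (rest.dropWhile (fun x => PySem.Chars.isdigit x == false)).length ≤ rest.length :=
        List.length_dropWhile_le _ _
      have hsplit : ch :: rest = (ch :: rest.takeWhile (fun x => PySem.Chars.isdigit x == false))
          ++ rest.dropWhile (fun x => PySem.Chars.isdigit x == false) := by
        simp [List.takeWhile_append_dropWhile]
      have hruns : sprRuns (ch :: rest)
          = (false, ch :: rest.takeWhile (fun x => PySem.Chars.isdigit x == false))
            :: sprRuns (rest.dropWhile (fun x => PySem.Chars.isdigit x == false)) := by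
        rw [sprRuns]; simp only [hkk]
      generalize hg1 : rest.takeWhile (fun x => PySem.Chars.isdigit x == false) = tw
        at htwall hsplit hruns
      generalize hg2 : rest.dropWhile (fun x => PySem.Chars.isdigit x == false) = dw
        at hdwlen hsplit hruns
      have hall : ∀ x ∈ ch :: tw, PySem.Chars.isdigit x = false := by
        intro x hx
        rcases List.mem_cons.1 hx with h | h
        · rw [h]; exact hkk
        · exact htwall x h
      rw [hruns, hsplit, sprA_nondigit_run (ch :: tw) hall, List.foldl_cons]
      simp only [sprStepB, Bool.false_eq_true, if_false]
      exact ih dw (by simpa using Nat.lt_succ_of_le hdwlen) d (c ++ ch :: tw)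

-- ===== VERDICT (by name: the statement is the Claim_ definition above) =====
theorem spr_nmbrs_str_spec : Claim_equal_spr_nmbrs_str := by
  intro str_a _
  unfold Spec_spr_nmbrs_str spr_nmbrs_str spr_nmbrs_str_alt
  have := sprMain str_a.toList.length str_a.toList rfl [] []
  rw [← this]
  rfl
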